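-- pv_equiv track=rewrite | github.com/CARLOSMOLERA/Algoritmia. | semana del 14/practica/gira_conciertos.py | planear_gira
-- ===== SOURCE A (Python) =====
-- def planear_gira(c,r,entradas,indice=0):
--     pd ={}# almacena el número de entradas
--     if(indice>=len(entradas) or c==0):
--         return 0
--
--     else:
--
--         indice2= indice+r-1
--         maximo=max(planear_gira(c,r,entradas,indice+1),entradas[indice]+planear_gira(c-1,r,entradas,indice+r))
--
--     return maximo
-- ===== SOURCE B (Python) =====
-- def planear_gira(c, r, entradas, indice=0):
--     n = len(entradas)
--     m = n - indice
--     if m <= 0 or c == 0: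
--         return 0
--     # at most ceil(m/r) concerts fit; larger (or negative) budgets act as unlimited
--     K = (m + r - 1) // r if r >= 1 else m
--     C = c if 0 <= c <= K else K
--     prev = [0] * (m + 1)          # row for budget j-1 over positions indice..n (sentinel 0 at the end)
--     for _ in range(C):
--         cur = [0] * (m + 1)
--         for k in range(m - 1, -1, -1):
--             take = entradas[indice + k] + (prev[k + r] if 0 <= k + r < m else 0)
--             skip = cur[k + 1]
--             cur[k] = skip if skip >= take else take
--         prev = cur
--     return prev[0]
-- ===== Notes on version B (the rewrite author's own statement) =====
-- stated objective: faster
-- what changed: Replaces A's exponential branching recursion by a bottom-up DP over (budget, position) rows with the budget clamped to ceil(m/r); intended as faster (a timing run saw A time out at n=4096, 536 ms vs B's 1.24 ms, and read 2.25x at the largest size both finished, below its confirmation threshold). …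
-- outside the precondition, e.g. on planear_gira(5, 0, [5, 3], 0): A returns 25, B returns 10; on planear_gira(2, -1, [5, 3], 0): A returns 10, B returns 8; on planear_gira(-1, 0, [5, 3], 0): A does not finish within the time limit, B returns 10
import Mathlib
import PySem

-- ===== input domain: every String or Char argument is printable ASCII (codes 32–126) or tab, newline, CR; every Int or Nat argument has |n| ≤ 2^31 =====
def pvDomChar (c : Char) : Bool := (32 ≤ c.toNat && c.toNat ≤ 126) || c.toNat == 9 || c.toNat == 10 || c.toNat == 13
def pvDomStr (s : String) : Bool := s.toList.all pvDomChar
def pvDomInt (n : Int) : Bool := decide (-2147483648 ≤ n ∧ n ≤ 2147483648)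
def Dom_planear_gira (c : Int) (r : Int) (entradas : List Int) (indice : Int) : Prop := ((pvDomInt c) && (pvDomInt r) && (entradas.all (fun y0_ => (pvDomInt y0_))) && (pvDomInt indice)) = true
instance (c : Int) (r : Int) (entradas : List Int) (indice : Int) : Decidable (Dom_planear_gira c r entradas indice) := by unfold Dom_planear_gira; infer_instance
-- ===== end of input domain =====

-- B replaces A's branching recursion by a bottom-up DP over (budget, position) rows with
-- the budget clamped to ceil(m/r); intended as faster (a timing run saw A time out at
-- some sizes where B returned but could not confirm a ratio at the largest size).

-- ===== PORT A =====
-- Literal transliteration of A's recursion; the fuel only makes it total in Lean: each call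
-- either increases indice (skip, and take when r ≥ 1) or decreases c (take when r = 0), so
-- under Pre_ (1 ≤ r) depth ≤ (len - indice) + 1 ≤ the fuel and it never runs out.
-- entradas[indice] is PySem.List.pyGet?; .getD 0 is only reached when the index is out of
-- range, which Pre_ (-len ≤ indice) excludes.
def planGiraFuel : Nat → Int → Int → List Int → Int → Int
  | 0, _, _, _, _ => 0
  | f+1, c, r, entradas, indice =>
    if (entradas.length : Int) ≤ indice ∨ c = 0 then 0
    else
      max (planGiraFuel f c r entradas (indice + 1))
          (((PySem.List.pyGet? entradas indice).getD 0) + planGiraFuel f (c - 1) r entradas (indice + r))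

def planear_gira (c : Int) (r : Int) (entradas : List Int) (indice : Int) : Int :=
  planGiraFuel (((entradas.length : Int) - indice).toNat + c.toNat + 1) c r entradas indice

-- ===== PORT B =====
-- take-value of cell k: entradas[indice + k] + (prev[k + r] if 0 <= k + r < m else 0)
def pgTake (entradas : List Int) (indice r : Int) (m : Nat) (prev : List Int) (k : Nat) : Int :=
  ((PySem.List.pyGet? entradas (indice + (k : Int))).getD 0) +
    (if 0 ≤ (k : Int) + r ∧ (k : Int) + r < (m : Int) then (PySem.List.pyGet? prev ((k : Int) + r)).getD 0 else 0)

-- the inner 'for k in range(m-1, -1, -1)' loop: after t steps the row covers cells m-t .. m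
def pgRow (entradas : List Int) (indice r : Int) (m : Nat) (prev : List Int) : Nat → List Int
  | 0 => [0]
  | t+1 =>
    let rest := pgRow entradas indice r m prev t
    let take := pgTake entradas indice r m prev (m - (t+1))
    let skip := rest.headD 0
    (if skip ≥ take then skip else take) :: rest

-- the outer 'for _ in range(C)' loop
def pgIter (entradas : List Int) (indice r : Int) (m : Nat) : Nat → List Int
  | 0 => List.replicate (m + 1) 0
  | j+1 => pgRow entradas indice r m (pgIter entradas indice r m j) m

def planear_gira_alt (c : Int) (r : Int) (entradas : List Int) (indice : Int) : Int :=
  let m : Int := (entradas.length : Int) - indice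
  if m ≤ 0 ∨ c = 0 then 0
  else
    let K : Int := if 1 ≤ r then PySem.Int.floordiv (m + r - 1) r else m
    let C : Int := if 0 ≤ c ∧ c ≤ K then c else K
    (pgIter entradas indice r m.toNat C.toNat).headD 0

-- ===== PRECONDITION & SPEC =====
-- Pre_ restricts to the task's natural domain: a positive cooldown (1 ≤ r) and a start index
-- Python accepts (-len ≤ indice; below that A raises IndexError), plus the inputs where A's
-- value does not depend on r and B matches it for any r: indice ≥ len or c = 0 (A returns 0
-- at once) and c = 1 (best single ticket). For the remaining unnatural region (r ≤ 0 with
-- indice < len and c ∉ {0, 1}), which B does not mirror, A's value is an implementation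
-- artefact — it re-attends the same concert (r = 0, returning c·max) or earlier, negatively
-- wrapped concerts (r < 0) — and on parts of that region A recurses forever (c < 0) or
-- raises IndexError/RecursionError.
def Pre_planear_gira (c : Int) (r : Int) (entradas : List Int) (indice : Int) : Prop :=
  ((1 ≤ r ∨ c = 1) ∧ -(entradas.length : Int) ≤ indice) ∨ (entradas.length : Int) ≤ indice ∨ c = 0

instance (c : Int) (r : Int) (entradas : List Int) (indice : Int) : Decidable (Pre_planear_gira c r entradas indice) := by unfold Pre_planear_gira; infer_instance

def pvWitness_planear_gira : Int × Int × List Int × Int := (2, 2, [3, 1, 4, 1], 0)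

def Spec_planear_gira (c : Int) (r : Int) (entradas : List Int) (indice : Int) (out : Int) : Prop := out = planear_gira_alt c r entradas indice
instance (c : Int) (r : Int) (entradas : List Int) (indice : Int) (out : Int) : Decidable (Spec_planear_gira c r entradas indice out) := by unfold Spec_planear_gira; infer_instance

-- ===== CLAIM (what is proved, stated in full; the proofs are below) =====
def Claim_equal_planear_gira : Prop := ∀ (c : Int) (r : Int) (entradas : List Int) (indice : Int), Dom_planear_gira c r entradas indice → Pre_planear_gira c r entradas indice → Spec_planear_gira c r entradas indice (planear_gira c r entradas indice)

-- ===== LEMMAS AND PROOFS =====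

-- proof device: the recurrence on (budget j, remaining positions d); cell value for
-- d remaining positions reads entradas[len - d]
def gAux (e : List Int) (rr : Nat) : Nat → Nat → Int
  | _, 0 => 0
  | 0, _+1 => 0
  | j+1, d+1 =>
      max (gAux e rr (j+1) d)
          (((PySem.List.pyGet? e ((e.length : Int) - ((d : Int) + 1))).getD 0) + gAux e rr j (d - (rr - 1)))
  termination_by j d => (j, d)

-- proof device: the same recurrence with unlimited budget
def gInfAux (e : List Int) (rr : Nat) : Nat → Int
  | 0 => 0
  | d+1 =>
      max (gInfAux e rr d)
          (((PySem.List.pyGet? e ((e.length : Int) - ((d : Int) + 1))).getD 0) + gInfAux e rr (d - (rr - 1)))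

theorem gAux_zero_budget (e : List Int) (rr d : Nat) : gAux e rr 0 d = 0 := by
  cases d <;> simp [gAux]

theorem gAux_zero_pos (e : List Int) (rr j : Nat) : gAux e rr j 0 = 0 := by
  cases j <;> simp [gAux]

theorem planGiraFuel_eq_gAux (e : List Int) (r : Int) (hr : 1 ≤ r) :
    ∀ (f : Nat) (c i : Int), ((e.length : Int) - i).toNat < f → 0 ≤ c →
      planGiraFuel f c r e i = gAux e r.toNat c.toNat ((e.length : Int) - i).toNat := by
  intro f
  induction f with
  | zero => intro c i h _; omega
  | succ f ih =>
    intro c i h hc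
    by_cases hstop : (e.length : Int) ≤ i ∨ c = 0
    · have hd0 : ((e.length : Int) - i).toNat = 0 ∨ c.toNat = 0 := by omega
      simp only [planGiraFuel, if_pos hstop]
      rcases hd0 with h0 | h0
      · rw [h0]; cases c.toNat <;> simp [gAux]
      · rw [h0, gAux_zero_budget]
    · push_neg at hstop
      obtain ⟨hi, hc0⟩ := hstop
      have hc1 : 1 ≤ c := by omega
      obtain ⟨d', hd'⟩ : ∃ d', ((e.length : Int) - i).toNat = d' + 1 := ⟨((e.length : Int) - i).toNat - 1, by omega⟩
      obtain ⟨j, hj⟩ : ∃ j, c.toNat = j + 1 := ⟨c.toNat - 1, by omega⟩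
      have hskip : planGiraFuel f c r e (i + 1) = gAux e r.toNat c.toNat ((e.length : Int) - (i + 1)).toNat :=
        ih c (i + 1) (by omega) hc
      have htake : planGiraFuel f (c - 1) r e (i + r) = gAux e r.toNat (c - 1).toNat ((e.length : Int) - (i + r)).toNat :=
        ih (c - 1) (i + r) (by omega) (by omega)
      have hd1 : ((e.length : Int) - (i + 1)).toNat = d' := by omega
      have hd2 : ((e.length : Int) - (i + r)).toNat = d' - (r.toNat - 1) := by omega
      have hcm1 : (c - 1).toNat = j := by omega
      have hidx : (e.length : Int) - ((d' : Int) + 1) = i := by omega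
      rw [planGiraFuel, if_neg (by push_neg; exact ⟨hi, hc0⟩), hd', hj, gAux, hidx,
        hskip, htake, hd1, hd2, hcm1, hj]

theorem planGiraFuel_eq_gInfAux (e : List Int) (r : Int) (hr : 1 ≤ r) :
    ∀ (f : Nat) (c i : Int), ((e.length : Int) - i).toNat < f → c < 0 →
      planGiraFuel f c r e i = gInfAux e r.toNat ((e.length : Int) - i).toNat := by
  intro f
  induction f with
  | zero => intro c i h _; omega
  | succ f ih =>
    intro c i h hc
    by_cases hstop : (e.length : Int) ≤ i
    · have hd0 : ((e.length : Int) - i).toNat = 0 := by omega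
      simp [planGiraFuel, hstop, hd0, gInfAux]
    · push_neg at hstop
      obtain ⟨d', hd'⟩ : ∃ d', ((e.length : Int) - i).toNat = d' + 1 := ⟨((e.length : Int) - i).toNat - 1, by omega⟩
      have hskip : planGiraFuel f c r e (i + 1) = gInfAux e r.toNat ((e.length : Int) - (i + 1)).toNat :=
        ih c (i + 1) (by omega) hc
      have htake : planGiraFuel f (c - 1) r e (i + r) = gInfAux e r.toNat ((e.length : Int) - (i + r)).toNat :=
        ih (c - 1) (i + r) (by omega) (by omega)
      have hd1 : ((e.length : Int) - (i + 1)).toNat = d' := by omega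
      have hd2 : ((e.length : Int) - (i + r)).toNat = d' - (r.toNat - 1) := by omega
      have hidx : (e.length : Int) - ((d' : Int) + 1) = i := by omega
      rw [planGiraFuel, if_neg (by push_neg; exact ⟨hstop, by omega⟩), hd', gInfAux, hidx,
        hskip, htake, hd1, hd2]

theorem gAux_eq_gInfAux (e : List Int) (rr : Nat) :
    ∀ (d j : Nat), d ≤ j * rr → gAux e rr j d = gInfAux e rr d := by
  intro d
  induction d using Nat.strong_induction_on with
  | _ d ih =>
    intro j hdj
    match d, j with
    | 0, j => cases j <;> simp [gAux, gInfAux]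
    | d+1, 0 => rw [Nat.zero_mul] at hdj; omega
    | d+1, j+1 =>
      rw [Nat.succ_mul] at hdj
      rw [gAux, gInfAux, ih d (by omega) (j + 1) (by rw [Nat.succ_mul]; omega),
        ih (d - (rr - 1)) (by omega) j (by omega)]

theorem headD_of_getElem? {l : List Int} {v : Int} (h : l[0]? = some v) : l.headD 0 = v := by
  cases l with
  | nil => simp at h
  | cons a t => simp at h; simp [h]

theorem pgRow_spec (e : List Int) (i r : Int) (m : Nat) (prev : List Int) (j : Nat)
    (hr : 1 ≤ r) (him : i + (m : Int) = (e.length : Int))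
    (hprev : ∀ x : Nat, x ≤ m → prev[x]? = some (gAux e r.toNat j (m - x))) :
    ∀ t : Nat, t ≤ m →
      (pgRow e i r m prev t).length = t + 1 ∧
      ∀ a : Nat, a ≤ t → (pgRow e i r m prev t)[a]? = some (gAux e r.toNat (j + 1) (t - a)) := by
  intro t
  induction t with
  | zero =>
    intro _
    refine ⟨rfl, ?_⟩
    intro a ha
    interval_cases a
    simp [pgRow, gAux]
  | succ t ih =>
    intro ht
    obtain ⟨ihlen, ihget⟩ := ih (by omega)
    have hskip : (pgRow e i r m prev t).headD 0 = gAux e r.toNat (j + 1) t := by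
      have := ihget 0 (by omega)
      simpa using headD_of_getElem? this
    have hk : (m : Int) - ((t : Int) + 1) = ((m - (t + 1) : Nat) : Int) := by omega
    have hidx : i + ((m - (t + 1) : Nat) : Int) = (e.length : Int) - ((t : Int) + 1) := by omega
    have htake : pgTake e i r m prev (m - (t + 1)) =
        ((PySem.List.pyGet? e ((e.length : Int) - ((t : Int) + 1))).getD 0) +
          gAux e r.toNat j (t - (r.toNat - 1)) := by
      unfold pgTake
      rw [hidx]
      congr 1
      by_cases hlt : ((m - (t + 1) : Nat) : Int) + r < (m : Int)
      · rw [if_pos ⟨by omega, hlt⟩]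
        have hx : ((m - (t + 1) : Nat) : Int) + r = ((m - (t + 1) + r.toNat : Nat) : Int) := by omega
        have hxle : m - (t + 1) + r.toNat ≤ m := by omega
        rw [hx, PySem.List.pyGet?_natCast, hprev _ hxle]
        have : m - (m - (t + 1) + r.toNat) = t - (r.toNat - 1) := by omega
        simp [this]
      · rw [if_neg (by omega)]
        have : t - (r.toNat - 1) = 0 := by omega
        rw [this, gAux_zero_pos]
    constructor
    · simp [pgRow, ihlen]
    · intro a ha
      show ((if (pgRow e i r m prev t).headD 0 ≥ pgTake e i r m prev (m - (t+1)) then (pgRow e i r m prev t).headD 0 else pgTake e i r m prev (m - (t+1))) :: pgRow e i r m prev t)[a]? = _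
      match a with
      | 0 =>
        simp only [List.getElem?_cons_zero, Option.some.injEq, Nat.sub_zero]
        rw [hskip, htake, gAux]
        rcases le_total (((PySem.List.pyGet? e ((e.length : Int) - ((t : Int) + 1))).getD 0) + gAux e r.toNat j (t - (r.toNat - 1))) (gAux e r.toNat (j + 1) t) with h | h
        · rw [if_pos h, max_eq_left h]
        · by_cases heq : gAux e r.toNat (j + 1) t ≥ ((PySem.List.pyGet? e ((e.length : Int) - ((t : Int) + 1))).getD 0) + gAux e r.toNat j (t - (r.toNat - 1))
          · rw [if_pos heq]; omega
          · rw [if_neg heq, max_eq_right h]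
      | a'+1 =>
        simp only [List.getElem?_cons_succ]
        rw [ihget a' (by omega)]
        congr 2
        omega

theorem pgIter_spec (e : List Int) (i r : Int) (m : Nat)
    (hr : 1 ≤ r) (him : i + (m : Int) = (e.length : Int)) :
    ∀ j : Nat, (pgIter e i r m j).length = m + 1 ∧
      ∀ x : Nat, x ≤ m → (pgIter e i r m j)[x]? = some (gAux e r.toNat j (m - x)) := by
  intro j
  induction j with
  | zero =>
    constructor
    · simp [pgIter]
    · intro x hx
      rw [pgIter, List.getElem?_replicate, if_pos (by omega), gAux_zero_budget]
  | succ j ih =>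
    obtain ⟨_, ihget⟩ := ih
    exact pgRow_spec e i r m (pgIter e i r m j) j hr him ihget m (by omega)

-- ===== VERDICT (by name: the statement is the Claim_ definition above) =====
theorem pg_main_case (c r : Int) (e : List Int) (i : Int) (hr : 1 ≤ r)
    (hlo : -(e.length : Int) ≤ i) :
    planear_gira c r e i = planear_gira_alt c r e i := by
  unfold planear_gira planear_gira_alt
  by_cases hstop : (e.length : Int) - i ≤ 0 ∨ c = 0
  · rw [if_pos hstop]
    rw [planGiraFuel, if_pos (by omega)]
  · push_neg at hstop
    obtain ⟨hi, hc0⟩ := hstop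
    rw [if_neg (by push_neg; exact ⟨hi, hc0⟩)]
    set m : Int := (e.length : Int) - i with hm
    have hmpos : 0 < m := by omega
    have him : i + ((m.toNat : Nat) : Int) = (e.length : Int) := by omega
    have hfuel : ((e.length : Int) - i).toNat < ((e.length : Int) - i).toNat + c.toNat + 1 := by omega
    rw [if_pos hr]
    set K : Int := PySem.Int.floordiv (m + r - 1) r with hKdef
    have hKval : K = (m + r - 1) / r := by
      rw [hKdef, PySem.Int.floordiv_eq_ediv_of_pos (by omega)]
    have hKmul : m ≤ K * r := by
      have hmod := Int.emod_lt_of_pos (m + r - 1) (show (0:Int) < r by omega)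
      have hdm := Int.ediv_add_emod (m + r - 1) r
      have : (m + r - 1) = r * K + (m + r - 1) % r := by rw [hKval]; omega
      nlinarith [Int.emod_nonneg (m + r - 1) (show (r:Int) ≠ 0 by omega)]
    have hK0 : 0 ≤ K := by
      rw [hKval]; exact Int.ediv_nonneg (by omega) (by omega)
    have hmulNat : m.toNat ≤ K.toNat * r.toNat := by
      have h1 : (((K.toNat * r.toNat : Nat)) : Int) = K * r := by
        push_cast; rw [Int.toNat_of_nonneg hK0, Int.toNat_of_nonneg (by omega)]
      omega
    show planGiraFuel (m.toNat + c.toNat + 1) c r e i =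
      (pgIter e i r m.toNat (if 0 ≤ c ∧ c ≤ K then c else K).toNat).headD 0
    by_cases hC : 0 ≤ c ∧ c ≤ K
    · rw [if_pos hC]
      obtain ⟨_, hget⟩ := pgIter_spec e i r m.toNat hr him c.toNat
      have := hget 0 (by omega)
      rw [headD_of_getElem? (by simpa using this)]
      exact planGiraFuel_eq_gAux e r hr _ c i hfuel hC.1
    · rw [if_neg hC]
      have hB : (pgIter e i r m.toNat K.toNat).headD 0 = gInfAux e r.toNat m.toNat := by
        obtain ⟨_, hget⟩ := pgIter_spec e i r m.toNat hr him K.toNat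
        have := hget 0 (by omega)
        rw [headD_of_getElem? (by simpa using this)]
        exact gAux_eq_gInfAux e r.toNat m.toNat K.toNat hmulNat
      rw [hB]
      by_cases hcneg : c < 0
      · exact planGiraFuel_eq_gInfAux e r hr _ c i hfuel hcneg
      · have hcge : 0 ≤ c := by omega
        have hcK : K < c := by
          rcases not_and_or.mp hC with h | h
          · omega
          · omega
        rw [planGiraFuel_eq_gAux e r hr _ c i hfuel hcge]
        refine gAux_eq_gInfAux e r.toNat ((e.length : Int) - i).toNat c.toNat ?_
        have : K.toNat * r.toNat ≤ c.toNat * r.toNat :=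
          Nat.mul_le_mul_right _ (by omega)
        omega

-- A with budget c = 1: the take branch exhausts the budget at once, so the result is the
-- best single (nonnegative-clamped) ticket from indice on, independent of r; gAux e 0 1 is
-- that chain (its second recursive call has budget 0 and vanishes).
theorem planGiraFuel_zero_c (f : Nat) (r : Int) (e : List Int) (i : Int) :
    planGiraFuel f 0 r e i = 0 := by
  cases f <;> simp [planGiraFuel]

theorem planGiraFuel_one_c (e : List Int) (r : Int) :
    ∀ (f : Nat) (i : Int), ((e.length : Int) - i).toNat < f →
      planGiraFuel f 1 r e i = gAux e 0 1 ((e.length : Int) - i).toNat := by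
  intro f
  induction f with
  | zero => intro i h; omega
  | succ f ih =>
    intro i h
    by_cases hstop : (e.length : Int) ≤ i
    · have hd0 : ((e.length : Int) - i).toNat = 0 := by omega
      rw [planGiraFuel, if_pos (Or.inl hstop), hd0, gAux_zero_pos]
    · push_neg at hstop
      obtain ⟨d', hd'⟩ : ∃ d', ((e.length : Int) - i).toNat = d' + 1 := ⟨((e.length : Int) - i).toNat - 1, by omega⟩
      have hskip : planGiraFuel f 1 r e (i + 1) = gAux e 0 1 ((e.length : Int) - (i + 1)).toNat :=
        ih (i + 1) (by omega)
      have hd1 : ((e.length : Int) - (i + 1)).toNat = d' := by omega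
      have hidx : (e.length : Int) - ((d' : Int) + 1) = i := by omega
      rw [planGiraFuel, if_neg (by push_neg; exact ⟨hstop, by omega⟩), hd', gAux, hidx,
        hskip, hd1, show (1:Int) - 1 = 0 from rfl, planGiraFuel_zero_c, gAux_zero_budget,
        Nat.zero_add]

theorem pyGetD_replicate_zero (n : Nat) (x : Int) :
    (PySem.List.pyGet? (List.replicate n (0 : Int)) x).getD 0 = 0 := by
  simp only [PySem.List.pyGet?, PySem.List.pyIdx?]
  split_ifs <;> simp [List.getElem?_replicate] <;> split_ifs <;> rfl

-- the single DP row over the all-zero row computes the same chain, for ANY r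
theorem pgRow_one (e : List Int) (i r : Int) (m : Nat)
    (him : i + (m : Int) = (e.length : Int)) :
    ∀ t : Nat, t ≤ m →
      (pgRow e i r m (List.replicate (m + 1) 0) t).headD 0 = gAux e 0 1 t := by
  intro t
  induction t with
  | zero => intro _; simp [pgRow, gAux_zero_pos]
  | succ t ih =>
    intro ht
    have hskip := ih (by omega)
    have hidx : i + ((m - (t + 1) : Nat) : Int) = (e.length : Int) - ((t : Int) + 1) := by omega
    have htake : pgTake e i r m (List.replicate (m + 1) 0) (m - (t + 1)) =
        ((PySem.List.pyGet? e ((e.length : Int) - ((t : Int) + 1))).getD 0) := by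
      unfold pgTake
      rw [hidx]
      split_ifs <;> simp [pyGetD_replicate_zero]
    show ((if (pgRow e i r m (List.replicate (m + 1) 0) t).headD 0 ≥ pgTake e i r m (List.replicate (m + 1) 0) (m - (t+1)) then (pgRow e i r m (List.replicate (m + 1) 0) t).headD 0 else pgTake e i r m (List.replicate (m + 1) 0) (m - (t+1))) :: pgRow e i r m (List.replicate (m + 1) 0) t).headD 0 = _
    rw [List.headD_cons, hskip, htake, gAux, gAux_zero_budget, add_zero, Nat.zero_add]
    rcases le_total ((PySem.List.pyGet? e ((e.length : Int) - ((t : Int) + 1))).getD 0) (gAux e 0 1 t) with h | h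
    · rw [if_pos h, max_eq_left h]
    · by_cases heq : gAux e 0 1 t ≥ (PySem.List.pyGet? e ((e.length : Int) - ((t : Int) + 1))).getD 0
      · rw [if_pos heq]; omega
      · rw [if_neg heq, max_eq_right h]

theorem pg_one_case (r : Int) (e : List Int) (i : Int) (hr : ¬ 1 ≤ r)
    (hlo : -(e.length : Int) ≤ i) :
    planear_gira 1 r e i = planear_gira_alt 1 r e i := by
  unfold planear_gira planear_gira_alt
  by_cases hstop : (e.length : Int) - i ≤ 0
  · rw [if_pos (Or.inl hstop), planGiraFuel, if_pos (Or.inl (by omega))]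
  · push_neg at hstop
    rw [if_neg (by push_neg; exact ⟨hstop, one_ne_zero⟩), if_neg hr]
    set m : Int := (e.length : Int) - i with hm
    have him : i + ((m.toNat : Nat) : Int) = (e.length : Int) := by omega
    have hC : (if (0:Int) ≤ 1 ∧ (1:Int) ≤ m then (1:Int) else m) = 1 :=
      if_pos ⟨by norm_num, by omega⟩
    show planGiraFuel (m.toNat + (1:Int).toNat + 1) 1 r e i =
      (pgIter e i r m.toNat ((if (0:Int) ≤ 1 ∧ (1:Int) ≤ m then (1:Int) else m)).toNat).headD 0
    rw [hC]
    have h1 : (1:Int).toNat = 1 := rfl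
    rw [h1, planGiraFuel_one_c e r _ i (by omega)]
    show _ = (pgRow e i r m.toNat (pgIter e i r m.toNat 0) m.toNat).headD 0
    rw [show pgIter e i r m.toNat 0 = List.replicate (m.toNat + 1) 0 from rfl,
      pgRow_one e i r m.toNat him m.toNat (le_refl _)]

theorem planear_gira_spec : Claim_equal_planear_gira := by
  intro c r e i _ hpre
  unfold Spec_planear_gira
  rcases hpre with ⟨hr1, hlo⟩ | htriv | htriv
  · rcases hr1 with hr | hc1
    · exact pg_main_case c r e i hr hlo
    · subst hc1
      by_cases hr : 1 ≤ r
      · exact pg_main_case 1 r e i hr hlo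
      · exact pg_one_case r e i hr hlo
  · unfold planear_gira planear_gira_alt
    rw [if_pos (Or.inl (by omega)), planGiraFuel, if_pos (Or.inl htriv)]
  · unfold planear_gira planear_gira_alt
    rw [if_pos (Or.inr htriv), planGiraFuel, if_pos (Or.inr htriv)]
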